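-- pv_equiv track=rewrite | github.com/omaralaz32/Pyspike_Test | Spike_Order.py | so_matrix
-- ===== SOURCE A (Python) =====
-- def so_matrix(matrix):
--     transformed_matrix = []
--     for row in matrix:
--         transformed_row = []
--         count = 0
--         for element in row:
--             if element == 1:
--                 count += 1
--                 if count % 2 == 0:
--                     transformed_row.append(-1)
--                 else:
--                     transformed_row.append(element)
--             else:
--                 transformed_row.append(element)
--
--         transformed_matrix.append(transformed_row)
--
--     return transformed_matrix
-- ===== SOURCE B (Python) =====
-- def so_matrix(matrix):
--     result = []
--     for row in matrix:
--         new = list(row)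
--         pos = [i for i, v in enumerate(row) if v == 1]
--         for i in pos[1::2]:
--             new[i] = -1
--         result.append(new)
--     return result
-- ===== Notes on version B (the rewrite author's own statement) =====
-- stated objective: alternative
-- what changed: Replaces A's per-element running even/odd counter with building an index table of the 1-positions per row and one strided pass (pos[1::2]) that sets exactly those entries of a row copy to -1.
import Mathlib
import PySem

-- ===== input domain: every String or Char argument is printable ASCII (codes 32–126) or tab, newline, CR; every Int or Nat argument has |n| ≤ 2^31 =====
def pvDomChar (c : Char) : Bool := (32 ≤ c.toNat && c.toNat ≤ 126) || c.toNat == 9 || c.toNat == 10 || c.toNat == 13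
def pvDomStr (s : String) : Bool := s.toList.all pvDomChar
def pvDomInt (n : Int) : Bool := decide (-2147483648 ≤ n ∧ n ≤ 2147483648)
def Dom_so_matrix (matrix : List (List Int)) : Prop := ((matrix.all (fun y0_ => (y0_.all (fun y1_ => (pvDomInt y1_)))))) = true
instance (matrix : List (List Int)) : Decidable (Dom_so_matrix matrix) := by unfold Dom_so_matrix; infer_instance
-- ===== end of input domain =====

-- B replaces A's per-row running even/odd counter with an index table of the 1-positions
-- and one strided pass (pos[1::2]) setting those entries to -1 (objective: alternative; same cost).

-- ===== PORT A =====
def so_matrix (matrix : List (List Int)) : List (List Int) :=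
  matrix.foldl
    (fun transformed_matrix row =>
      let st := row.foldl
        (fun (st : List Int × Nat) element =>
          if element == 1 then
            let count := st.2 + 1
            if count % 2 == 0 then (st.1 ++ [(-1 : Int)], count)
            else (st.1 ++ [element], count)
          else (st.1 ++ [element], st.2))
        ([], 0)
      transformed_matrix ++ [st.1])
    []

-- ===== PORT B =====
-- hand port of the Python step slice l[1::2] (start 1, step 2): the elements at odd
-- positions; exact for every list since start and step are fixed nonnegative literals.
def sliceOdd {α : Type} : List α → List α
  | [] => []
  | [_] => []
  | _ :: b :: t => b :: sliceOdd t

def so_matrix_alt (matrix : List (List Int)) : List (List Int) :=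
  matrix.foldl
    (fun result row =>
      let pos : List Int :=
        ((PySem.List.enumerate row).filter (fun p => p.2 == 1)).map Prod.fst
      let new := (sliceOdd pos).foldl (fun new i => PySem.List.pySetD new i (-1)) row
      result ++ [new])
    []

-- ===== PRECONDITION & SPEC =====
def Spec_so_matrix (matrix : List (List Int)) (out : List (List Int)) : Prop := out = so_matrix_alt matrix
instance (matrix : List (List Int)) (out : List (List Int)) : Decidable (Spec_so_matrix matrix out) := by unfold Spec_so_matrix; infer_instance

-- ===== CLAIM (what is proved, stated in full; the proofs are below) =====
def Claim_equal_so_matrix : Prop := ∀ (matrix : List (List Int)), Dom_so_matrix matrix → Spec_so_matrix matrix (so_matrix matrix)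

-- ===== LEMMAS AND PROOFS =====

-- the elements at even positions (companion of sliceOdd, proof use only)
def evenSl {α : Type} : List α → List α
  | [] => []
  | a :: t => a :: sliceOdd t

-- the intended per-row value: the (c+k)-th 1 (k counted from 1) becomes -1 when c+k is even
def rowSpec (c : Nat) : List Int → List Int
  | [] => []
  | x :: xs => if x = 1 then (if (c + 1) % 2 = 0 then (-1 : Int) else x) :: rowSpec (c + 1) xs
               else x :: rowSpec c xs

def posFn (row : List Int) : List Int :=
  ((PySem.List.enumerate row).filter (fun p => p.2 == 1)).map Prod.fst

def setNeg (xs : List Int) (idxs : List Int) : List Int :=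
  idxs.foldl (fun n i => PySem.List.pySetD n i (-1)) xs

theorem sliceOdd_cons {α : Type} (a : α) (t : List α) : sliceOdd (a :: t) = evenSl t := by
  cases t <;> rfl

theorem sliceOdd_map {α β : Type} (f : α → β) (l : List α) :
    sliceOdd (l.map f) = (sliceOdd l).map f := by
  induction l using sliceOdd.induct <;> simp_all [sliceOdd]

theorem evenSl_map {α β : Type} (f : α → β) (l : List α) :
    evenSl (l.map f) = (evenSl l).map f := by
  cases l <;> simp [evenSl, sliceOdd_map]

theorem mem_sliceOdd {α : Type} {a : α} {l : List α} (h : a ∈ sliceOdd l) : a ∈ l := by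
  induction l using sliceOdd.induct with
  | case1 => simp [sliceOdd] at h
  | case2 => simp [sliceOdd] at h
  | case3 x b t ih =>
    simp [sliceOdd] at h
    rcases h with h | h
    · simp [h]
    · simp [ih h]

theorem mem_evenSl {α : Type} {a : α} {l : List α} (h : a ∈ evenSl l) : a ∈ l := by
  cases l with
  | nil => simp [evenSl] at h
  | cons x t =>
    simp [evenSl] at h
    rcases h with h | h
    · simp [h]
    · simp [mem_sliceOdd h]

theorem enum_shift (xs : List Int) (s : Int) :
    PySem.List.enumerate xs (s + 1) = (PySem.List.enumerate xs s).map (fun p => (p.1 + 1, p.2)) := by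
  induction xs generalizing s with
  | nil => rfl
  | cons x t ih =>
    rw [PySem.List.enumerate_cons, PySem.List.enumerate_cons, List.map_cons, ← ih]

theorem posFn_cons (x : Int) (xs : List Int) :
    posFn (x :: xs) = (if x = 1 then [(0 : Int)] else []) ++ (posFn xs).map (· + 1) := by
  unfold posFn
  rw [PySem.List.enumerate_cons, show (0 : Int) + 1 = 0 + 1 from rfl, enum_shift]
  rw [List.filter_cons, List.filter_map]
  by_cases hx : x = 1 <;> simp [hx, List.map_map, Function.comp_def]

theorem posFn_nonneg (row : List Int) : ∀ i ∈ posFn row, 0 ≤ i := by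
  induction row with
  | nil => simp [posFn]
  | cons x xs ih =>
    intro i hi
    rw [posFn_cons] at hi
    rcases List.mem_append.1 hi with h | h
    · by_cases hx : x = 1 <;> simp [hx] at h; omega
    · rcases List.mem_map.1 h with ⟨j, hj, rfl⟩
      have := ih j hj; omega

theorem setNeg_shift (x : Int) (xs : List Int) (idxs : List Int) (h : ∀ i ∈ idxs, 0 ≤ i) :
    setNeg (x :: xs) (idxs.map (· + 1)) = x :: setNeg xs idxs := by
  induction idxs generalizing xs with
  | nil => rfl
  | cons i t ih =>
    have hi : 0 ≤ i := h i (by simp)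
    have hset : PySem.List.pySetD (x :: xs) (i + 1) (-1) = x :: PySem.List.pySetD xs i (-1) := by
      rw [PySem.List.pySetD_of_nonneg _ _ (by omega), PySem.List.pySetD_of_nonneg _ _ hi]
      have : (i + 1).toNat = i.toNat + 1 := by omega
      rw [this]; rfl
    simp only [setNeg, List.map_cons, List.foldl_cons, hset]
    exact ih (PySem.List.pySetD xs i (-1)) (fun j hj => h j (by simp [hj]))

theorem setNeg_main (row : List Int) (c : Nat) :
    setNeg row (if c % 2 = 0 then sliceOdd (posFn row) else evenSl (posFn row)) = rowSpec c row := by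
  induction row generalizing c with
  | nil => cases Nat.decEq (c % 2) 0 <;> simp_all [posFn, setNeg, sliceOdd, evenSl, rowSpec]
  | cons x xs ih =>
    have hnn : ∀ i ∈ posFn xs, 0 ≤ i := posFn_nonneg xs
    rw [posFn_cons]
    by_cases hc : c % 2 = 0
    · rw [if_pos hc]
      by_cases hx : x = 1
      · -- c even, x = 1 : this 1 has rank c+1 (odd), stays
        subst hx
        rw [if_pos rfl, List.singleton_append, sliceOdd_cons, evenSl_map]
        rw [setNeg_shift 1 xs _ (fun i hi => hnn i (mem_evenSl hi))]
        have h1 : (c + 1) % 2 ≠ 0 := by omega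
        have hih := ih (c + 1)
        rw [if_neg h1] at hih
        rw [hih]
        simp [rowSpec, h1]
      · rw [if_neg hx, List.nil_append, sliceOdd_map]
        rw [setNeg_shift x xs _ (fun i hi => hnn i (mem_sliceOdd hi))]
        have hih := ih c
        rw [if_pos hc] at hih
        rw [hih]
        simp [rowSpec, hx]
    · rw [if_neg hc]
      by_cases hx : x = 1
      · -- c odd, x = 1 : this 1 has rank c+1 (even), becomes -1
        subst hx
        rw [if_pos rfl, List.singleton_append]
        rw [show evenSl ((0 : Int) :: (posFn xs).map (· + 1))
              = (0 : Int) :: sliceOdd ((posFn xs).map (· + 1)) from rfl]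
        rw [sliceOdd_map]
        have h0 : PySem.List.pySetD ((1 : Int) :: xs) 0 (-1) = (-1 : Int) :: xs := by
          rw [PySem.List.pySetD_of_nonneg _ _ (by omega)]; rfl
        have hsh := setNeg_shift (-1) xs (sliceOdd (posFn xs)) (fun i hi => hnn i (mem_sliceOdd hi))
        simp only [setNeg, List.foldl_cons, h0] at hsh ⊢
        rw [hsh]
        have h1 : (c + 1) % 2 = 0 := by omega
        have hih := ih (c + 1)
        rw [if_pos h1] at hih
        simp only [setNeg] at hih
        rw [hih]
        simp [rowSpec, h1]
      · rw [if_neg hx, List.nil_append, evenSl_map]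
        rw [setNeg_shift x xs _ (fun i hi => hnn i (mem_evenSl hi))]
        have hih := ih c
        rw [if_neg hc] at hih
        rw [hih]
        simp [rowSpec, hx]

theorem foldA_spec (row : List Int) (c : Nat) (tr : List Int) :
    row.foldl
      (fun (st : List Int × Nat) element =>
        if element == 1 then
          let count := st.2 + 1
          if count % 2 == 0 then (st.1 ++ [(-1 : Int)], count)
          else (st.1 ++ [element], count)
        else (st.1 ++ [element], st.2))
      (tr, c)
    = (tr ++ rowSpec c row, c + row.countP (· == 1)) := by
  induction row generalizing c tr with
  | nil => simp [rowSpec]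
  | cons x xs ih =>
    rw [List.foldl_cons]
    by_cases hx : x = 1
    · subst hx
      by_cases h2 : (c + 1) % 2 = 0
      · simp only [show ((1 : Int) == 1) = true from rfl, if_true,
          show ((c + 1) % 2 == 0) = true by simpa using h2]
        rw [ih (c + 1) (tr ++ [(-1 : Int)])]
        simp [rowSpec, h2]
        omega
      · simp only [show ((1 : Int) == 1) = true from rfl, if_true,
          show ((c + 1) % 2 == 0) = false by simpa using h2, Bool.false_eq_true, if_false]
        rw [ih (c + 1) (tr ++ [(1 : Int)])]
        simp [rowSpec, h2]
        omega
    · simp only [show (x == 1) = false by simpa using hx]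
      rw [if_neg (by simp)]
      rw [ih c (tr ++ [x])]
      simp [rowSpec, hx]

theorem row_eq (row : List Int) :
    (row.foldl
      (fun (st : List Int × Nat) element =>
        if element == 1 then
          let count := st.2 + 1
          if count % 2 == 0 then (st.1 ++ [(-1 : Int)], count)
          else (st.1 ++ [element], count)
        else (st.1 ++ [element], st.2))
      ([], 0)).1
    = (sliceOdd (((PySem.List.enumerate row).filter (fun p => p.2 == 1)).map Prod.fst)).foldl
        (fun new i => PySem.List.pySetD new i (-1)) row := by
  rw [foldA_spec row 0 []]
  have h := setNeg_main row 0
  rw [if_pos rfl] at h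
  simpa [setNeg, posFn] using h.symm

theorem outer_eq (matrix : List (List Int)) : so_matrix matrix = so_matrix_alt matrix := by
  unfold so_matrix so_matrix_alt
  induction matrix using List.reverseRecOn with
  | nil => rfl
  | append_singleton m row ih =>
    rw [List.foldl_append, List.foldl_append, ih]
    simp only [List.foldl_cons, List.foldl_nil]
    rw [row_eq]

-- ===== VERDICT (by name: the statement is the Claim_ definition above) =====
theorem so_matrix_spec : Claim_equal_so_matrix := by
  intro matrix _
  exact outer_eq matrix
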